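-- pv_equiv track=rewrite | github.com/adambalm/meta-ops-validator | src/metaops/integrations/retailer_profiles.py | get_namespace_aware_xpath
-- ===== SOURCE A (Python) =====
-- def get_namespace_aware_xpath(xpath: str) -> str:
--     """Convert XPath to namespace-aware format"""
--     # Replace common ONIX elements with namespace prefixes
--     replacements = {
--         "//Product": "//onix:Product",
--         "//RecordReference": "//onix:RecordReference",
--         "//ProductIdentifier": "//onix:ProductIdentifier",
--         "//DescriptiveDetail": "//onix:DescriptiveDetail",
--         "//PublishingDetail": "//onix:PublishingDetail",
--         "//ProductSupply": "//onix:ProductSupply"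
--     }
--
--     namespace_xpath = xpath
--     for old, new in replacements.items():
--         namespace_xpath = namespace_xpath.replace(old, new)
--
--     return namespace_xpath
-- ===== SOURCE B (Python) =====
-- def get_namespace_aware_xpath(xpath: str) -> str:
--     """Convert XPath to namespace-aware format in one left-to-right pass."""
--     names = ("Product", "RecordReference", "ProductIdentifier",
--              "DescriptiveDetail", "PublishingDetail", "ProductSupply")
--     out = []
--     i = 0
--     n = len(xpath)
--     while i < n:
--         for name in names:
--             if xpath.startswith("//" + name, i):
--                 out.append("//onix:" + name)
--                 i += 2 + len(name)
--                 break
--         else: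
--             out.append(xpath[i])
--             i += 1
--     return "".join(out)
-- ===== Notes on version B (the rewrite author's own statement) =====
-- stated objective: alternative
-- what changed: Replaces six sequential whole-string str.replace passes (one per ONIX element) with a single left-to-right scan that, at each position, matches '//<element>' against the element list once and emits '//onix:<element>' or copies the character.
import Mathlib
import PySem

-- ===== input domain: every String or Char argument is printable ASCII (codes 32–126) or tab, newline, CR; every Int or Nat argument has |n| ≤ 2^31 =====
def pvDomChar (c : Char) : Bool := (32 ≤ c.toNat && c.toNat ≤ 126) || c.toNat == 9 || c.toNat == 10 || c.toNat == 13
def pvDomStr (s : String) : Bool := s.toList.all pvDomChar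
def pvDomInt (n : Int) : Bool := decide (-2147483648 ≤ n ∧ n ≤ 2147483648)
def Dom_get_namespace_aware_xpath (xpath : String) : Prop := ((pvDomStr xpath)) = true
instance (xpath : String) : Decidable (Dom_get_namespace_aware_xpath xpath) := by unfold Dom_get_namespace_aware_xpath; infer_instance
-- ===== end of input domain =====

-- B replaces six sequential whole-string str.replace passes with one left-to-right scan that
-- matches '//<element>' against the element list at each position (objective: alternative).


-- ===== PORT A =====
def pvReplacements : List (String × String) :=
  [("//Product", "//onix:Product"),
   ("//RecordReference", "//onix:RecordReference"),
   ("//ProductIdentifier", "//onix:ProductIdentifier"),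
   ("//DescriptiveDetail", "//onix:DescriptiveDetail"),
   ("//PublishingDetail", "//onix:PublishingDetail"),
   ("//ProductSupply", "//onix:ProductSupply")]

-- port of A: the dict of replacements becomes an association list, the loop a foldl of PySem.Str.replace
def get_namespace_aware_xpath (xpath : String) : String :=
  pvReplacements.foldl (fun acc on => PySem.Str.replace acc on.1 on.2) xpath

-- ===== PORT B =====
-- B-side helpers: pvPat p = "//<p>", pvRep p = "//onix:<p>"; pvScan is Source B's while-loop:
-- at each position the first name whose "//<name>" matches is rewritten, else the char is copied
def pvPat (p : List Char) : List Char := '/' :: '/' :: p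
def pvRep (p : List Char) : List Char := '/' :: '/' :: 'o' :: 'n' :: 'i' :: 'x' :: ':' :: p

def pvNames : List (List Char) :=
  ["Product".toList, "RecordReference".toList, "ProductIdentifier".toList,
   "DescriptiveDetail".toList, "PublishingDetail".toList, "ProductSupply".toList]

def pvScan (names : List (List Char)) : List Char → List Char
  | [] => []
  | c :: t =>
    match names.find? (fun p => (pvPat p).isPrefixOf (c :: t)) with
    | some p => pvRep p ++ pvScan names (t.drop (p.length + 1))
    | none => c :: pvScan names t
termination_by l => l.length
decreasing_by
  · simp only [List.length_cons]
    have := List.length_drop (l := t) (i := p.length + 1)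
    omega
  · simp

-- port of B ("".join(out) over the single pass)
def get_namespace_aware_xpath_alt (xpath : String) : String :=
  String.ofList (pvScan pvNames xpath.toList)


-- ===== PRECONDITION & SPEC =====
def Spec_get_namespace_aware_xpath (xpath : String) (out : String) : Prop := out = get_namespace_aware_xpath_alt xpath
instance (xpath : String) (out : String) : Decidable (Spec_get_namespace_aware_xpath xpath out) := by unfold Spec_get_namespace_aware_xpath; infer_instance

-- ===== CLAIM (what is proved, stated in full; the proofs are below) =====
def Claim_equal_get_namespace_aware_xpath : Prop := ∀ (xpath : String), Dom_get_namespace_aware_xpath xpath → Spec_get_namespace_aware_xpath xpath (get_namespace_aware_xpath xpath)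

-- ===== LEMMAS AND PROOFS =====

-- proof-only helper: fuel-free reformulation of PySem.Chars.replace (for a nonempty pattern)
def pvRepl (q new : List Char) : List Char → List Char
  | [] => []
  | c :: t =>
    if q.isPrefixOf (c :: t) then new ++ pvRepl q new (t.drop (q.length - 1))
    else c :: pvRepl q new t
termination_by l => l.length
decreasing_by
  · simp only [List.length_cons]
    have := List.length_drop (l := t) (i := q.length - 1)
    omega
  · simp

theorem pv_prefix_append_cases {q v x : List Char} (h : q <+: v ++ x) : q <+: v ∨ v <+: q := by
  rcases h with ⟨r, hr⟩
  by_cases hle : q.length ≤ v.length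
  · left
    have h1 : (q ++ r).take q.length = (v ++ x).take q.length := by rw [hr]
    rw [List.take_append_of_le_length (Nat.le_refl _), List.take_length,
        List.take_append_of_le_length hle] at h1
    exact h1 ▸ List.take_prefix _ _
  · right
    have h1 : (q ++ r).take v.length = (v ++ x).take v.length := by rw [hr]
    rw [List.take_append_of_le_length (by omega), List.take_append_of_le_length (Nat.le_refl _),
        List.take_length] at h1
    exact h1 ▸ List.take_prefix _ _

theorem pvRepl_cons_nomatch {q : List Char} (new : List Char) {c : Char} {t : List Char}
    (h : ¬ q <+: c :: t) : pvRepl q new (c :: t) = c :: pvRepl q new t := by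
  have h' : q.isPrefixOf (c :: t) = false := by
    rw [← Bool.not_eq_true, List.isPrefixOf_iff_prefix]; exact h
  rw [pvRepl, h']
  simp

theorem pvRepl_match (q new : List Char) (hq : q ≠ []) (r : List Char) :
    pvRepl q new (q ++ r) = new ++ pvRepl q new r := by
  match q, hq with
  | a :: q', _ =>
    have h' : (a :: q').isPrefixOf (a :: (q' ++ r)) = true := by
      rw [List.isPrefixOf_iff_prefix]
      exact ⟨r, by simp⟩
    rw [List.cons_append, pvRepl, h']
    simp

theorem pvRepl_append {q : List Char} (new : List Char) {u x : List Char}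
    (h : ∀ i, i < u.length → ¬ q <+: u.drop i ++ x) :
    pvRepl q new (u ++ x) = u ++ pvRepl q new x := by
  induction u with
  | nil => simp
  | cons c u' ih =>
    have h0 : ¬ q <+: c :: (u' ++ x) := by simpa using h 0 (by simp)
    have ih' := ih (fun i hi => by simpa using h (i+1) (by simpa using hi))
    simp only [List.cons_append, pvRepl_cons_nomatch new h0, ih']

theorem pvScan_cons_some (names : List (List Char)) {c : Char} {t p : List Char}
    (h : List.find? (fun p => (pvPat p).isPrefixOf (c :: t)) names = some p) :
    pvScan names (c :: t) = pvRep p ++ pvScan names (t.drop (p.length + 1)) := by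
  rw [pvScan, h]

theorem pvScan_cons_none (names : List (List Char)) {c : Char} {t : List Char}
    (h : List.find? (fun p => (pvPat p).isPrefixOf (c :: t)) names = none) :
    pvScan names (c :: t) = c :: pvScan names t := by
  rw [pvScan, h]

theorem pvScan_append (names : List (List Char)) {u x : List Char}
    (h : ∀ p ∈ names, ∀ i, i < u.length → ¬ pvPat p <+: u.drop i ++ x) :
    pvScan names (u ++ x) = u ++ pvScan names x := by
  induction u with
  | nil => simp
  | cons c u' ih =>
    have hnone : (List.find? (fun p => (pvPat p).isPrefixOf (c :: (u' ++ x))) names) = none := by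
      rw [List.find?_eq_none]
      intro p hp
      rw [List.isPrefixOf_iff_prefix]
      simpa using h p hp 0 (by simp)
    have ih' := ih (fun p hp i hi => by simpa using h p hp (i+1) (by simpa using hi))
    rw [List.cons_append, pvScan_cons_none names hnone, ih']
    simp

theorem pvScan_nil_names : ∀ l, pvScan [] l = l := by
  intro l
  induction l with
  | nil => rw [pvScan]
  | cons c t ih => rw [pvScan]; simp [ih]

theorem pv_no_slash_prefix (names : List (List Char)) :
    ∀ (t w : List Char), (∀ c ∈ w, c ≠ '/') → w <+: pvScan names t → w <+: t := by
  intro t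
  induction t using pvScan.induct names with
  | case1 => intro w _ hw; rw [pvScan] at hw; simpa using hw
  | case2 c t p hfind ih =>
    intro w hwc hw
    rw [pvScan_cons_some names hfind] at hw
    match w, hw with
    | [], _ => exact List.nil_prefix
    | c' :: w', hw =>
      exfalso
      have hc : c' = '/' := by
        simp only [pvRep, List.cons_append, List.cons_prefix_cons] at hw
        exact hw.1
      exact hwc c' (by simp) hc
  | case3 c t hfind ih =>
    intro w hwc hw
    rw [pvScan_cons_none names hfind] at hw
    match w, hw with
    | [], _ => exact List.nil_prefix
    | c' :: w', hw =>
      rw [List.cons_prefix_cons] at hw ⊢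
      exact ⟨hw.1, ih w' (fun ch hch => hwc ch (by simp [hch])) hw.2⟩

theorem pv_slash_prefix (names : List (List Char)) {w : List Char}
    (hw1 : w ≠ []) (hw : ∀ c ∈ w, c ≠ '/') :
    ∀ t, ('/' :: w) <+: pvScan names t → ('/' :: w) <+: t := by
  intro t
  induction t using pvScan.induct names with
  | case1 => intro h; rw [pvScan] at h; simp at h
  | case2 c t p hfind ih =>
    intro h
    rw [pvScan_cons_some names hfind] at h
    exfalso
    match w, hw1, hw, h with
    | a :: w', _, hw, h =>
      simp only [pvRep, List.cons_append, List.cons_prefix_cons] at h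
      exact hw a (by simp) h.2.1
  | case3 c t hfind ih =>
    intro h
    rw [pvScan_cons_none names hfind] at h
    rw [List.cons_prefix_cons] at h ⊢
    exact ⟨h.1, pv_no_slash_prefix names t w hw h.2⟩


def pvGood (p : List Char) : Bool := !p.isEmpty && p.all (· != '/')

def pvOk2 (P : List (List Char)) (pk : List Char) : Bool :=
  P.all fun p => (List.range (pvRep p).length).all fun i =>
    !((pvPat pk).isPrefixOf ((pvRep p).drop i)) && !(((pvRep p).drop i).isPrefixOf (pvPat pk))

def pvOk3 (P : List (List Char)) (pk : List Char) : Bool :=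
  P.all fun q => (List.range (pvPat pk).length).all fun i =>
    i == 0 || (!((pvPat q).isPrefixOf ((pvPat pk).drop i)) && !(((pvPat pk).drop i).isPrefixOf (pvPat q)))

theorem pvGood_spec {p : List Char} (h : pvGood p = true) : p ≠ [] ∧ ∀ c ∈ p, c ≠ '/' := by
  simp only [pvGood, Bool.and_eq_true, List.all_eq_true, Bool.not_eq_true'] at h
  refine ⟨by simpa using h.1, fun c hc => by simpa using h.2 c hc⟩

theorem pvOk2_spec {P : List (List Char)} {pk : List Char} (h : pvOk2 P pk = true) :
    ∀ p ∈ P, ∀ i, i < (pvRep p).length →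
      ¬ pvPat pk <+: (pvRep p).drop i ∧ ¬ (pvRep p).drop i <+: pvPat pk := by
  simp only [pvOk2, List.all_eq_true, List.mem_range, Bool.and_eq_true, Bool.not_eq_true',
    ← Bool.not_eq_true, List.isPrefixOf_iff_prefix] at h
  exact fun p hp i hi => h p hp i hi

theorem pvOk3_spec {P : List (List Char)} {pk : List Char} (h : pvOk3 P pk = true) :
    ∀ q ∈ P, ∀ i, i < (pvPat pk).length → 0 < i →
      ¬ pvPat q <+: (pvPat pk).drop i ∧ ¬ (pvPat pk).drop i <+: pvPat q := by
  simp only [pvOk3, List.all_eq_true, List.mem_range, Bool.or_eq_true, beq_iff_eq,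
    Bool.and_eq_true, Bool.not_eq_true', ← Bool.not_eq_true, List.isPrefixOf_iff_prefix] at h
  intro q hq i hi hipos
  rcases h q hq i hi with h0 | hok
  · omega
  · exact hok

theorem pv_step (P : List (List Char)) (pk : List Char)
    (h1k : pk ≠ [] ∧ ∀ c ∈ pk, c ≠ '/')
    (h2 : ∀ p ∈ P, ∀ i, i < (pvRep p).length →
        ¬ pvPat pk <+: (pvRep p).drop i ∧ ¬ (pvRep p).drop i <+: pvPat pk)
    (h3 : ∀ q ∈ P, ∀ i, i < (pvPat pk).length → 0 < i →
        ¬ pvPat q <+: (pvPat pk).drop i ∧ ¬ (pvPat pk).drop i <+: pvPat q) :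
    ∀ (n : Nat) (l : List Char), l.length ≤ n →
      pvRepl (pvPat pk) (pvRep pk) (pvScan P l) = pvScan (P ++ [pk]) l := by
  intro n
  induction n with
  | zero =>
    intro l hl
    have : l = [] := by cases l <;> simp_all
    subst this
    rw [pvScan, pvScan, pvRepl]
  | succ n ih =>
    intro l hl
    match l with
    | [] => rw [pvScan, pvScan, pvRepl]
    | c :: t =>
      have hlt : t.length ≤ n := by simpa using hl
      cases hfind : List.find? (fun p => (pvPat p).isPrefixOf (c :: t)) P with
      | some p =>
        have hpP : p ∈ P := List.mem_of_find?_eq_some hfind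
        have hfind' : List.find? (fun p => (pvPat p).isPrefixOf (c :: t)) (P ++ [pk]) = some p := by
          rw [List.find?_append, hfind]; rfl
        rw [pvScan_cons_some P hfind, pvScan_cons_some (P ++ [pk]) hfind']
        rw [pvRepl_append (pvRep pk) (fun i hi hpre => by
          rcases pv_prefix_append_cases hpre with hx | hx
          · exact (h2 p hpP i hi).1 hx
          · exact (h2 p hpP i hi).2 hx)]
        rw [ih (t.drop (p.length + 1)) (by simp; omega)]
      | none =>
        have hnoP : ∀ p ∈ P, ¬ pvPat p <+: c :: t := by
          intro p hp
          have := List.find?_eq_none.mp hfind p hp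
          rw [List.isPrefixOf_iff_prefix] at this
          exact this
        by_cases hpk : pvPat pk <+: c :: t
        · obtain ⟨x, hx⟩ := hpk
          have hpref : (pvPat pk).isPrefixOf (c :: t) = true := by
            rw [List.isPrefixOf_iff_prefix]; exact ⟨x, hx⟩
          have hfind' : List.find? (fun p => (pvPat p).isPrefixOf (c :: t)) (P ++ [pk]) = some pk := by
            rw [List.find?_append, hfind]
            simp [hpref]
          have hxdrop : t.drop (pk.length + 1) = x := by
            have h1 : (c :: t).drop (pvPat pk).length = x := by
              rw [← hx, List.drop_left]
            simpa [pvPat] using h1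
          have hxlen : x.length ≤ n := by
            have h1 := congrArg List.length hx
            simp [pvPat] at h1
            omega
          have hscan : pvScan P (c :: t) = pvPat pk ++ pvScan P x := by
            rw [← hx]
            exact pvScan_append P (fun p hp i hi hpre => by
              rcases Nat.eq_zero_or_pos i with rfl | hipos
              · rw [List.drop_zero, hx] at hpre
                exact hnoP p hp hpre
              · rcases pv_prefix_append_cases hpre with hy | hy
                · exact (h3 p hp i hi hipos).1 hy
                · exact (h3 p hp i hi hipos).2 hy)
          rw [hscan, pvRepl_match _ _ (by simp [pvPat]) _, pvScan_cons_some (P ++ [pk]) hfind',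
              hxdrop, ih x hxlen]
        · have hpref : (pvPat pk).isPrefixOf (c :: t) = false := by
            rw [← Bool.not_eq_true, List.isPrefixOf_iff_prefix]; exact hpk
          have hfind' : List.find? (fun p => (pvPat p).isPrefixOf (c :: t)) (P ++ [pk]) = none := by
            rw [List.find?_append, hfind]
            simp [hpref]
          rw [pvScan_cons_none P hfind, pvScan_cons_none (P ++ [pk]) hfind']
          have hnm : ¬ pvPat pk <+: c :: pvScan P t := by
            intro hcon
            match pk, h1k.1, hcon with
            | a :: pk', _, hcon =>
              rw [pvPat, List.cons_prefix_cons] at hcon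
              have := pv_slash_prefix P (w := a :: pk') (by simp)
                (fun ch hch => h1k.2 ch hch) t hcon.2
              exact hpk (by rw [pvPat, List.cons_prefix_cons]; exact ⟨hcon.1, this⟩)
          rw [pvRepl_cons_nomatch _ hnm, ih t hlt]

theorem pv_step' (P : List (List Char)) (pk : List Char) (P' : List (List Char))
    (hP' : P ++ [pk] = P')
    (h1k : pvGood pk = true) (h2 : pvOk2 P pk = true) (h3 : pvOk3 P pk = true)
    (l : List Char) :
    pvRepl (pvPat pk) (pvRep pk) (pvScan P l) = pvScan P' l := by
  rw [← hP']
  exact pv_step P pk (pvGood_spec h1k) (pvOk2_spec h2) (pvOk3_spec h3) l.length l (Nat.le_refl _)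

theorem pv_go_eq (q new : List Char) (hq : q ≠ []) :
    ∀ (fuel : Nat) (l acc : List Char), l.length ≤ fuel →
      PySem.Chars.replace.go q new fuel l acc = acc.reverse ++ pvRepl q new l := by
  intro fuel
  induction fuel with
  | zero =>
    intro l acc hl
    have : l = [] := by cases l <;> simp_all
    subst this
    rw [PySem.Chars.replace.go, pvRepl]
  | succ n ih =>
    intro l acc hl
    match l with
    | [] =>
      rw [PySem.Chars.replace.go, pvRepl] <;> simp
    | c :: t =>
      rw [PySem.Chars.replace.go]
      by_cases hpre : q.isPrefixOf (c :: t)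
      · rw [if_pos hpre]
        match q, hq with
        | a :: q', _ =>
          have hdl : (c :: t).length - (a :: q').length ≤ n := by simp at hl ⊢; omega
          rw [ih _ _ (by rw [List.length_drop]; exact hdl)]
          rw [pvRepl, if_pos hpre]
          simp [List.drop_succ_cons]
      · rw [if_neg hpre]
        rw [ih t (c :: acc) (by simpa using hl)]
        rw [pvRepl_cons_nomatch new (by rw [← List.isPrefixOf_iff_prefix]; simpa using hpre)]
        simp

theorem pv_replace_eq (s q new : List Char) (hq : q ≠ []) :
    PySem.Chars.replace s q new = pvRepl q new s := by
  rw [PySem.Chars.replace]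
  have hq' : q.isEmpty = false := by simpa using hq
  rw [hq']
  simpa using pv_go_eq q new hq s.length s [] (Nat.le_refl _)

set_option maxRecDepth 200000 in
theorem pv_chain (l : List Char) :
    pvRepl "//ProductSupply".toList "//onix:ProductSupply".toList
     (pvRepl "//PublishingDetail".toList "//onix:PublishingDetail".toList
      (pvRepl "//DescriptiveDetail".toList "//onix:DescriptiveDetail".toList
       (pvRepl "//ProductIdentifier".toList "//onix:ProductIdentifier".toList
        (pvRepl "//RecordReference".toList "//onix:RecordReference".toList
         (pvRepl "//Product".toList "//onix:Product".toList l)))))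
    = pvScan pvNames l := by
  have e1 : "//Product".toList = pvPat "Product".toList := by decide
  have e2 : "//RecordReference".toList = pvPat "RecordReference".toList := by decide
  have e3 : "//ProductIdentifier".toList = pvPat "ProductIdentifier".toList := by decide
  have e4 : "//DescriptiveDetail".toList = pvPat "DescriptiveDetail".toList := by decide
  have e5 : "//PublishingDetail".toList = pvPat "PublishingDetail".toList := by decide
  have e6 : "//ProductSupply".toList = pvPat "ProductSupply".toList := by decide
  have f1 : "//onix:Product".toList = pvRep "Product".toList := by decide
  have f2 : "//onix:RecordReference".toList = pvRep "RecordReference".toList := by decide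
  have f3 : "//onix:ProductIdentifier".toList = pvRep "ProductIdentifier".toList := by decide
  have f4 : "//onix:DescriptiveDetail".toList = pvRep "DescriptiveDetail".toList := by decide
  have f5 : "//onix:PublishingDetail".toList = pvRep "PublishingDetail".toList := by decide
  have f6 : "//onix:ProductSupply".toList = pvRep "ProductSupply".toList := by decide
  rw [e1, e2, e3, e4, e5, e6, f1, f2, f3, f4, f5, f6]
  have step1 : pvRepl (pvPat "Product".toList) (pvRep "Product".toList) l
      = pvScan ["Product".toList] l :=
    (congrArg (pvRepl (pvPat "Product".toList) (pvRep "Product".toList))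
      (pvScan_nil_names l)).symm.trans
      (pv_step' [] "Product".toList ["Product".toList] rfl (by decide) (by decide) (by decide) l)
  rw [step1]
  rw [pv_step' ["Product".toList] "RecordReference".toList
      ["Product".toList, "RecordReference".toList] rfl (by decide) (by decide) (by decide)]
  rw [pv_step' ["Product".toList, "RecordReference".toList] "ProductIdentifier".toList
      ["Product".toList, "RecordReference".toList, "ProductIdentifier".toList] rfl
      (by decide) (by decide) (by decide)]
  rw [pv_step' ["Product".toList, "RecordReference".toList, "ProductIdentifier".toList]
      "DescriptiveDetail".toList
      ["Product".toList, "RecordReference".toList, "ProductIdentifier".toList,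
       "DescriptiveDetail".toList] rfl (by decide) (by decide) (by decide)]
  rw [pv_step' ["Product".toList, "RecordReference".toList, "ProductIdentifier".toList,
       "DescriptiveDetail".toList] "PublishingDetail".toList
      ["Product".toList, "RecordReference".toList, "ProductIdentifier".toList,
       "DescriptiveDetail".toList, "PublishingDetail".toList] rfl
      (by decide) (by decide) (by decide)]
  rw [pv_step' ["Product".toList, "RecordReference".toList, "ProductIdentifier".toList,
       "DescriptiveDetail".toList, "PublishingDetail".toList] "ProductSupply".toList
      pvNames rfl (by decide) (by decide) (by decide)]

set_option maxRecDepth 200000 in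
theorem pv_final (x : String) : get_namespace_aware_xpath x = get_namespace_aware_xpath_alt x := by
  unfold get_namespace_aware_xpath get_namespace_aware_xpath_alt pvReplacements
  simp only [List.foldl_cons, List.foldl_nil]
  refine String.toList_inj.mp ?_
  simp only [PySem.Str.toList_replace, String.toList_ofList]
  rw [pv_replace_eq _ _ _ (by decide), pv_replace_eq _ _ _ (by decide),
      pv_replace_eq _ _ _ (by decide), pv_replace_eq _ _ _ (by decide),
      pv_replace_eq _ _ _ (by decide), pv_replace_eq _ _ _ (by decide)]
  exact pv_chain x.toList

-- ===== VERDICT (by name: the statement is the Claim_ definition above) =====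
theorem get_namespace_aware_xpath_spec : Claim_equal_get_namespace_aware_xpath := by
  intro xpath _
  unfold Spec_get_namespace_aware_xpath
  exact pv_final xpath
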